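-- pv_equiv track=rewrite | github.com/deadbugcode/adventofcode | 2024/22/aoc22.py | process
-- ===== SOURCE A (Python) =====
-- BANANA_COUNT= {}
--
-- def next_secret_num(n):
--     next_sn = n
--     step1 = bin(next_sn) + "000000" # x64
--     next_sn = mix_and_prune(next_sn, step1)
--
--     step2 = bin(0)
--     if (next_sn >= 32):
--         step2 = bin(next_sn)[:-5] # //32
--     next_sn = mix_and_prune(next_sn, step2)
--
--     step3 = bin(next_sn) + "00000000000" # x 2048  (2^11)
--     next_sn = mix_and_prune(next_sn, step3)
--     return next_sn
--
-- def mix_and_prune(sn, val_str):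
--     # Prune first, order of op doesn't matter
--     pruned_val = 0
--     if len(val_str) > 25:
--         pruned_val = int(val_str[len(val_str)-24:],2)
--     else:
--         pruned_val = int(val_str, 2)
--     mix = sn ^ pruned_val
--     return mix
--
-- def process(start, nth):
--     # Parts one & two.
--     curr = start
--     prices = []
--     for _ in range(nth):
--         prices += [curr % 10]
--         curr = next_secret_num(curr)
--     max_banana(prices)
--     return curr
--
-- def gen_diffs(prices):
--     diffs = [0] * (len(prices) - 1)
--     for i in range(1,len(prices)):
--         diffs[i-1] = prices[i]-prices[i-1]
--     return diffs
--
-- def max_banana(prices):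
--     diffs = gen_diffs(prices)
--     seen_keys = set()
--     for i in range(4,len(prices)):
--         key = str(diffs[i-4:i])
--         if key in seen_keys: continue
--         seen_keys.add(key)
--         BANANA_COUNT.setdefault(key, 0)
--         BANANA_COUNT[key] += prices[i]
-- ===== SOURCE B (Python) =====
-- BANANA_COUNT = {}
--
-- def process(start, nth):
--     # Single streaming pass: arithmetic secret-number step, running 4-diff window,
--     # banana counts accumulated into the same module-global BANANA_COUNT.
--     M = 16777216  # 2**24
--     curr = start
--     prev_price = None
--     window = []
--     seen = set()
--     for _ in range(nth):
--         price = curr % 10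
--         if prev_price is not None:
--             window = window[-3:] + [price - prev_price]
--             if len(window) == 4:
--                 key = str(window)
--                 if key not in seen:
--                     seen.add(key)
--                     BANANA_COUNT[key] = BANANA_COUNT.get(key, 0) + price
--         prev_price = price
--         s = curr
--         s ^= (s * 64) % M
--         s ^= (s // 32) % M
--         s ^= (s * 2048) % M
--         curr = s
--     return curr
-- ===== Notes on version B (the rewrite author's own statement) =====
-- stated objective: simpler
-- what changed: Replaces the binary-string bin()/slice/int(.,2) secret-number step with direct modular arithmetic and fuses price collection, diff-window generation and banana accounting into one streaming loop with a 4-diff window, eliminating the per-step string building/parsing and the intermediate prices/diffs lists.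
-- outside the precondition, e.g. on process(-1, 5): A returns 15027553, B returns -216706; on process(-123456, 5): A raises ValueError, B returns -3544884
import Mathlib
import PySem

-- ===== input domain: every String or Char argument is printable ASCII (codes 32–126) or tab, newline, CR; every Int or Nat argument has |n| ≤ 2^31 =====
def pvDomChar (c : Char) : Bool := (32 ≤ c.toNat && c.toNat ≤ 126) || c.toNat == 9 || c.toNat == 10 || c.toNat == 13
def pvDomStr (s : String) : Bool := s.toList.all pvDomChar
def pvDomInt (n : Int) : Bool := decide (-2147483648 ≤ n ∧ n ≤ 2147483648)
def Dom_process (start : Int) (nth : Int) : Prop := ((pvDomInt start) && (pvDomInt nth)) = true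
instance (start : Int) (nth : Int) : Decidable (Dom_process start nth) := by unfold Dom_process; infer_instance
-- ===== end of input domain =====

-- B replaces A's binary-string secret-number step by direct modular arithmetic and fuses the
-- price/diff/banana bookkeeping into one streaming loop (objective: simpler). Both Pythons mutate
-- the module-global BANANA_COUNT identically; the equivalence proved here is about the RETURN value.

-- ===== PORT A =====
-- int(s, 2) over a char list: optional '-' sign, optional "0b" prefix, then binary digits.
-- Exact on the strings A actually feeds it (sign/prefix/digits); ported by hand step for step.
def pvBinVal (s : List Char) : Nat := s.foldl (fun a c => 2 * a + (if c = '1' then 1 else 0)) 0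

def pvNatToBin (n : Nat) : List Char :=
  if h : n = 0 then [] else pvNatToBin (n / 2) ++ [if n % 2 = 1 then '1' else '0']
decreasing_by exact Nat.div_lt_self (Nat.pos_of_ne_zero h) (by omega)

-- Python bin(n): "0b<digits>" for n ≥ 0, "-0b<digits>" for n < 0 (magnitude digits).
def pyBinCore (n : Nat) : List Char := '0' :: 'b' :: (if n = 0 then ['0'] else pvNatToBin n)
def pyBin (n : Int) : List Char := if n < 0 then '-' :: pyBinCore (-n).toNat else pyBinCore n.toNat

def pyIntB2Core (s : List Char) : Int :=
  if s.take 2 = ['0', 'b'] then (pvBinVal (s.drop 2) : Int) else (pvBinVal s : Int)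
def pyIntB2 (s : List Char) : Int :=
  if s.take 1 = ['-'] then -(pyIntB2Core (s.drop 1)) else pyIntB2Core s

-- mix_and_prune: val_str[len(val_str)-24:] is List.drop (len-24); '^' is PySem.Int.bxor.
def mixAndPrune (sn : Int) (valStr : List Char) : Int :=
  let pruned := if valStr.length > 25 then pyIntB2 (valStr.drop (valStr.length - 24))
                else pyIntB2 valStr
  PySem.Int.bxor sn pruned

def nextSecretNum (n : Int) : Int :=
  let step1 := pyBin n ++ ['0','0','0','0','0','0']            -- bin(n) + "000000"
  let n1 := mixAndPrune n step1
  let step2 := if n1 ≥ 32 then (pyBin n1).take ((pyBin n1).length - 5)  -- bin(n1)[:-5]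
               else pyBin 0
  let n2 := mixAndPrune n1 step2
  let step3 := pyBin n2 ++ ['0','0','0','0','0','0','0','0','0','0','0'] -- bin(n2) + 11 zeros
  mixAndPrune n2 step3

-- the for-loop of process: accumulates prices (curr % 10) and advances curr.
-- max_banana(prices) only mutates the module-global BANANA_COUNT, never the return value; it is
-- not part of the returned computation and is omitted here (noted in the header).
def processLoop : Int → List Int → Nat → Int
  | curr, _,      0          => curr
  | curr, prices, Nat.succ k =>
      processLoop (nextSecretNum curr) (prices ++ [PySem.Int.mod curr 10]) k

def process (start : Int) (nth : Int) : Int := processLoop start [] nth.toNat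

-- ===== PORT B =====
-- one arithmetic step: s ^= (s*64)%M; s ^= (s//32)%M; s ^= (s*2048)%M  (M = 2^24)
def altStep (s : Int) : Int :=
  let m : Int := 16777216
  let s1 := PySem.Int.bxor s (PySem.Int.mod (s * 64) m)
  let s2 := PySem.Int.bxor s1 (PySem.Int.mod (PySem.Int.floordiv s1 32) m)
  PySem.Int.bxor s2 (PySem.Int.mod (s2 * 2048) m)

-- B's streaming loop; its price/window/seen/BANANA_COUNT bookkeeping mutates module state only,
-- never the return value, and is omitted here (noted in the header).
def altLoop : Int → Nat → Int
  | curr, 0          => curr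
  | curr, Nat.succ k => altLoop (altStep curr) k

def process_alt (start : Int) (nth : Int) : Int := altLoop start nth.toNat

-- ===== PRECONDITION & SPEC =====
-- Pre_ excludes negative start with a positive iteration count: there A's bin()-string slicing
-- raises ValueError for certain bit-lengths (a 'b' or '-' lands in the 24-char slice) and on the
-- remaining negatives returns sign-mangled artifacts of slicing "-0b…" strings; with nth ≤ 0 the
-- loop never runs, so those inputs are kept.
def Pre_process (start : Int) (nth : Int) : Prop := 0 ≤ start ∨ nth ≤ 0
instance (start : Int) (nth : Int) : Decidable (Pre_process start nth) := by
  unfold Pre_process; infer_instance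

def pvWitness_process : Int × Int := (123, 10)

def Spec_process (start : Int) (nth : Int) (out : Int) : Prop := out = process_alt start nth
instance (start : Int) (nth : Int) (out : Int) : Decidable (Spec_process start nth out) := by
  unfold Spec_process; infer_instance

-- ===== CLAIM (what is proved, stated in full; the proofs are below) =====
def Claim_equal_process : Prop :=
  ∀ (start : Int) (nth : Int), Dom_process start nth → Pre_process start nth →
    Spec_process start nth (process start nth)

-- ===== LEMMAS AND PROOFS =====

theorem pvBinVal_foldl (s : List Char) (a : Nat) :
    s.foldl (fun a c => 2 * a + (if c = '1' then 1 else 0)) a = a * 2 ^ s.length + pvBinVal s := by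
  induction s generalizing a with
  | nil => simp [pvBinVal]
  | cons c t ih =>
      have hc : pvBinVal (c :: t) =
          List.foldl (fun a c => 2 * a + (if c = '1' then 1 else 0))
            (2 * 0 + (if c = '1' then 1 else 0)) t := rfl
      rw [List.foldl_cons, ih, hc, ih, List.length_cons]
      ring

theorem pvBinVal_append (xs ys : List Char) :
    pvBinVal (xs ++ ys) = pvBinVal xs * 2 ^ ys.length + pvBinVal ys := by
  unfold pvBinVal
  rw [List.foldl_append, pvBinVal_foldl]
  rfl

theorem pvBinVal_lt (s : List Char) : pvBinVal s < 2 ^ s.length := by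
  induction s with
  | nil => simp [pvBinVal]
  | cons c t ih =>
      have h : pvBinVal (c :: t) = (if c = '1' then 1 else 0) * 2 ^ t.length + pvBinVal t := by
        have := pvBinVal_append [c] t
        simpa [pvBinVal] using this
      rw [h]
      have : (if c = '1' then 1 else 0) ≤ 1 := by split <;> omega
      calc (if c = '1' then 1 else 0) * 2 ^ t.length + pvBinVal t
          ≤ 2 ^ t.length + pvBinVal t := by nlinarith
        _ < 2 ^ t.length + 2 ^ t.length := by omega
        _ = 2 ^ (c :: t).length := by rw [List.length_cons]; ring

theorem pvBinVal_natToBin (n : Nat) : pvBinVal (pvNatToBin n) = n := by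
  induction n using Nat.strong_induction_on with
  | _ n ih =>
      rw [pvNatToBin]
      split
      · simp [pvBinVal, *]
      · rename_i h
        rw [pvBinVal_append, ih (n / 2) (Nat.div_lt_self (Nat.pos_of_ne_zero h) (by omega))]
        have : pvBinVal [if n % 2 = 1 then '1' else '0'] = n % 2 := by
          split <;> simp [pvBinVal] <;> omega
        rw [this]
        simp only [List.length_singleton]
        omega

theorem pvNatToBin_digits (n : Nat) : ∀ c ∈ pvNatToBin n, c = '0' ∨ c = '1' := by
  induction n using Nat.strong_induction_on with
  | _ n ih =>
      rw [pvNatToBin]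
      split
      · simp
      · rename_i h
        intro c hc
        rcases List.mem_append.mp hc with hc | hc
        · exact ih (n / 2) (Nat.div_lt_self (Nat.pos_of_ne_zero h) (by omega)) c hc
        · simp only [List.mem_singleton] at hc
          subst hc; split <;> simp

theorem pyIntB2_digits (s : List Char) (h : ∀ c ∈ s, c = '0' ∨ c = '1') :
    pyIntB2 s = (pvBinVal s : Int) := by
  unfold pyIntB2 pyIntB2Core
  match s with
  | [] => simp
  | [c] =>
      have := h c (by simp)
      rcases this with h1 | h1 <;> subst h1 <;> simp
  | c :: d :: t =>
      have hc := h c (by simp)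
      have hd := h d (by simp)
      have h1 : (c :: d :: t).take 1 ≠ ['-'] := by
        rcases hc with h' | h' <;> subst h' <;> simp
      have h2 : (c :: d :: t).take 2 ≠ ['0', 'b'] := by
        rcases hd with h' | h' <;> subst h' <;> simp
      rw [if_neg h1, if_neg h2]

-- the heart: mix_and_prune on a "0b"-prefixed digit string prunes to binVal mod 2^24.
theorem mixAndPrune_0b (sn : Int) (D : List Char) (hD : ∀ c ∈ D, c = '0' ∨ c = '1') :
    mixAndPrune sn ('0' :: 'b' :: D) = PySem.Int.bxor sn ((pvBinVal D % 16777216 : Nat) : Int) := by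
  unfold mixAndPrune
  by_cases hlen : ('0' :: 'b' :: D).length > 25
  · rw [if_pos hlen]
    simp only [List.length_cons] at hlen ⊢
    have h24 : 24 ≤ D.length := by omega
    have hdrop : ('0' :: 'b' :: D).drop (D.length + 1 + 1 - 24) = D.drop (D.length - 24) := by
      have : D.length + 1 + 1 - 24 = (D.length - 24) + 2 := by omega
      rw [this]; rfl
    rw [hdrop, pyIntB2_digits _ (fun c hc => hD c (List.drop_subset _ _ hc))]
    have hpow : (2 : Nat) ^ 24 = 16777216 := by norm_num
    have hdl : D.length - (D.length - 24) = 24 := by omega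
    have hsplit : pvBinVal D =
        pvBinVal (D.take (D.length - 24)) * 16777216 + pvBinVal (D.drop (D.length - 24)) := by
      conv_lhs => rw [← List.take_append_drop (D.length - 24) D]
      rw [pvBinVal_append, List.length_drop, hdl, hpow]
    have hlt : pvBinVal (D.drop (D.length - 24)) < 16777216 := by
      have h := pvBinVal_lt (D.drop (D.length - 24))
      rwa [List.length_drop, hdl, hpow] at h
    have heq : pvBinVal (D.drop (D.length - 24)) = pvBinVal D % 16777216 := by omega
    rw [heq]
  · rw [if_neg hlen]
    simp only [List.length_cons, not_lt] at hlen
    rw [pyIntB2]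
    have : ('0' :: 'b' :: D).take 1 ≠ ['-'] := by simp
    rw [if_neg this, pyIntB2Core, if_pos (by simp)]
    simp only [List.drop_succ_cons, List.drop_zero]
    have hlt : pvBinVal D < 16777216 := by
      have := pvBinVal_lt D
      have hle : (2 : Nat) ^ D.length ≤ 2 ^ 23 := Nat.pow_le_pow_right (by omega) (by omega)
      have : pvBinVal D < 2 ^ 23 := lt_of_lt_of_le this hle
      omega
    rw [Nat.mod_eq_of_lt hlt]

-- bin of a nonnegative int is "0b" ++ digits with the right value.
theorem pyBin_natCast (m : Nat) :
    pyBin (m : Int) = '0' :: 'b' :: (if m = 0 then ['0'] else pvNatToBin m) := by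
  unfold pyBin pyBinCore
  rw [if_neg (by omega)]
  simp

theorem pyBinDigits_digits (m : Nat) :
    ∀ c ∈ (if m = 0 then ['0'] else pvNatToBin m), c = '0' ∨ c = '1' := by
  split
  · simp
  · exact pvNatToBin_digits m

theorem pvBinVal_binDigits (m : Nat) :
    pvBinVal (if m = 0 then ['0'] else pvNatToBin m) = m := by
  split
  · simp [pvBinVal]; omega
  · exact pvBinVal_natToBin m

theorem natToBin_len_ge (m : Nat) (h : 32 ≤ m) : 5 ≤ (pvNatToBin m).length := by
  by_contra hlt
  have h1 := pvBinVal_lt (pvNatToBin m)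
  rw [pvBinVal_natToBin] at h1
  have : (2 : Nat) ^ (pvNatToBin m).length ≤ 2 ^ 4 := Nat.pow_le_pow_right (by omega) (by omega)
  omega

theorem bxor_natCast' (a b : Nat) :
    PySem.Int.bxor (a : Int) (b : Int) = ((a ^^^ b : Nat) : Int) := PySem.Int.bxor_natCast a b

-- nextSecretNum agrees with the arithmetic step on every nonnegative input.
theorem nextSecretNum_eq_altStep (m : Nat) :
    nextSecretNum (m : Int) = altStep (m : Int) ∧
    nextSecretNum (m : Int) = ((m ^^^ (m * 64 % 16777216)) ^^^
      ((m ^^^ (m * 64 % 16777216)) / 32 % 16777216) ^^^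
      (((m ^^^ (m * 64 % 16777216)) ^^^ ((m ^^^ (m * 64 % 16777216)) / 32 % 16777216)) * 2048 %
        16777216) : Nat) := by
  set m1 : Nat := m ^^^ (m * 64 % 16777216) with hm1
  set m2 : Nat := m1 ^^^ (m1 / 32 % 16777216) with hm2
  set m3 : Nat := m2 ^^^ (m2 * 2048 % 16777216) with hm3
  -- step 1, A side
  have hstep1 : mixAndPrune (m : Int) (pyBin (m : Int) ++ ['0','0','0','0','0','0']) = (m1 : Int) := by
    rw [pyBin_natCast]
    have : ('0' :: 'b' :: (if m = 0 then ['0'] else pvNatToBin m)) ++ ['0','0','0','0','0','0'] =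
        '0' :: 'b' :: ((if m = 0 then ['0'] else pvNatToBin m) ++ ['0','0','0','0','0','0']) := by
      simp
    rw [this, mixAndPrune_0b]
    · rw [pvBinVal_append, pvBinVal_binDigits]
      have hz : pvBinVal ['0','0','0','0','0','0'] = 0 := by decide
      rw [hz]
      simp only [List.length_cons, List.length_nil]
      rw [bxor_natCast']
      norm_num [hm1]
    · intro c hc
      rcases List.mem_append.mp hc with hc | hc
      · exact pyBinDigits_digits m c hc
      · fin_cases hc <;> simp
  -- step 2, A side
  have hstep2 : mixAndPrune (m1 : Int)
      (if (m1 : Int) ≥ 32 then (pyBin (m1 : Int)).take ((pyBin (m1 : Int)).length - 5)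
       else pyBin 0) = (m2 : Int) := by
    by_cases h32 : 32 ≤ m1
    · rw [if_pos (by exact_mod_cast h32), pyBin_natCast]
      have hm1ne : m1 ≠ 0 := by omega
      rw [if_neg hm1ne]
      set T := pvNatToBin m1 with hT
      have hlen5 : 5 ≤ T.length := natToBin_len_ge m1 h32
      have htake : ('0' :: 'b' :: T).take (('0' :: 'b' :: T).length - 5) =
          '0' :: 'b' :: T.take (T.length - 5) := by
        simp only [List.length_cons]
        have : T.length + 1 + 1 - 5 = (T.length - 5) + 2 := by omega
        rw [this]
        rfl
      rw [htake, mixAndPrune_0b _ _ (fun c hc => pvNatToBin_digits m1 c (List.take_subset _ _ hc))]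
      have hpow : (2 : Nat) ^ 5 = 32 := by norm_num
      have hdl : T.length - (T.length - 5) = 5 := by omega
      have hsplit : pvBinVal T =
          pvBinVal (T.take (T.length - 5)) * 32 + pvBinVal (T.drop (T.length - 5)) := by
        conv_lhs => rw [← List.take_append_drop (T.length - 5) T]
        rw [pvBinVal_append, List.length_drop, hdl, hpow]
      have hlt : pvBinVal (T.drop (T.length - 5)) < 32 := by
        have h := pvBinVal_lt (T.drop (T.length - 5))
        rwa [List.length_drop, hdl, hpow] at h
      have hval : pvBinVal T = m1 := by rw [hT, pvBinVal_natToBin]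
      have hdiv : pvBinVal (T.take (T.length - 5)) = m1 / 32 := by
        rw [hval] at hsplit
        omega
      rw [hdiv, bxor_natCast', hm2]
    · rw [if_neg (by exact_mod_cast h32)]
      have : pyBin 0 = '0' :: 'b' :: ['0'] := by rfl
      rw [this, mixAndPrune_0b _ _ (by simp)]
      have hz : pvBinVal ['0'] = 0 := by decide
      rw [hz]
      have hd : m1 / 32 = 0 := Nat.div_eq_of_lt (by omega)
      rw [hm2, hd]
      simp
  -- step 3, A side
  have hstep3 : mixAndPrune (m2 : Int)
      (pyBin (m2 : Int) ++ ['0','0','0','0','0','0','0','0','0','0','0']) = (m3 : Int) := by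
    rw [pyBin_natCast]
    have : ('0' :: 'b' :: (if m2 = 0 then ['0'] else pvNatToBin m2)) ++
        ['0','0','0','0','0','0','0','0','0','0','0'] =
        '0' :: 'b' :: ((if m2 = 0 then ['0'] else pvNatToBin m2) ++
          ['0','0','0','0','0','0','0','0','0','0','0']) := by simp
    rw [this, mixAndPrune_0b]
    · rw [pvBinVal_append, pvBinVal_binDigits]
      have hz : pvBinVal ['0','0','0','0','0','0','0','0','0','0','0'] = 0 := by decide
      rw [hz]
      simp only [List.length_cons, List.length_nil]
      rw [bxor_natCast']
      norm_num [hm3]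
    · intro c hc
      rcases List.mem_append.mp hc with hc | hc
      · exact pyBinDigits_digits m2 c hc
      · fin_cases hc <;> simp
  have hA : nextSecretNum (m : Int) = (m3 : Int) := by
    unfold nextSecretNum
    simp only
    rw [hstep1, hstep2, hstep3]
  have hmod : ∀ a : Nat, PySem.Int.mod (a : Int) 16777216 = ((a % 16777216 : Nat) : Int) := by
    intro a; simp
  have hfd : ∀ a : Nat, PySem.Int.floordiv (a : Int) 32 = ((a / 32 : Nat) : Int) := by
    intro a; simp
  have e1 : PySem.Int.bxor (m : Int) (PySem.Int.mod ((m : Int) * 64) 16777216) = (m1 : Int) := by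
    rw [show ((m : Int) * 64) = ((m * 64 : Nat) : Int) by push_cast; ring, hmod, bxor_natCast']
  have e2 : PySem.Int.bxor (m1 : Int)
      (PySem.Int.mod (PySem.Int.floordiv (m1 : Int) 32) 16777216) = (m2 : Int) := by
    rw [hfd, hmod, bxor_natCast']
  have e3 : PySem.Int.bxor (m2 : Int) (PySem.Int.mod ((m2 : Int) * 2048) 16777216) = (m3 : Int) := by
    rw [show ((m2 : Int) * 2048) = ((m2 * 2048 : Nat) : Int) by push_cast; ring, hmod, bxor_natCast']
  have hB : altStep (m : Int) = (m3 : Int) := by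
    simp only [altStep]
    rw [e1, e2, e3]
  exact ⟨hA.trans hB.symm, by rw [hA]⟩

theorem loop_eq (k : Nat) : ∀ (m : Nat) (ps : List Int),
    processLoop (m : Int) ps k = altLoop (m : Int) k := by
  induction k with
  | zero => intro m ps; rfl
  | succ k ih =>
      intro m ps
      show processLoop (nextSecretNum (m : Int)) (ps ++ [PySem.Int.mod (m : Int) 10]) k =
        altLoop (altStep (m : Int)) k
      obtain ⟨h1, h2⟩ := nextSecretNum_eq_altStep m
      rw [← h1, h2]
      exact ih _ _

-- ===== VERDICT (by name: the statement is the Claim_ definition above) =====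
theorem process_spec : Claim_equal_process := by
  intro start nth _ hpre
  unfold Spec_process process process_alt
  rcases hpre with hs | hn
  · obtain ⟨m, rfl⟩ := Int.eq_ofNat_of_zero_le hs
    exact loop_eq nth.toNat m []
  · have : nth.toNat = 0 := Int.toNat_of_nonpos hn
    rw [this]
    rfl
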